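-- pv_equiv track=rewrite | github.com/pypi-data/pypi-mirror-379 | packages/rolint/rolint-0.1.11-py3-none-any.whl/rolint/rules/func_analysis_c.py | detect_recursive_functions
-- ===== SOURCE A (Python) =====
-- def detect_recursive_functions(call_graph):
--     visited = set()
--     stack = set()
--     recursive = set()
--
--     def dfs(func):
--         if func in stack:
--             recursive.add(func)
--             return
--         if func in visited:
--             return
--         visited.add(func)
--         stack.add(func)
--         for callee in call_graph.get(func, []):
--             dfs(callee)
--         stack.remove(func)
--
--     for func in call_graph:
--         dfs(func)
--
--     return recursive
-- ===== SOURCE B (Python) =====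
-- def detect_recursive_functions(call_graph):
--     visited = set()
--     stack = set()
--     recursive = set()
--
--     for func in call_graph:
--         if func in visited:
--             continue
--         visited.add(func)
--         stack.add(func)
--         frames = [(func, call_graph.get(func, []))]
--         while frames:
--             node, todo = frames.pop()
--             if todo:
--                 callee, rest = todo[0], todo[1:]
--                 frames.append((node, rest))
--                 if callee in stack:
--                     recursive.add(callee)
--                 elif callee in visited:
--                     pass
--                 else:
--                     visited.add(callee)
--                     stack.add(callee)
--                     frames.append((callee, call_graph.get(callee, [])))
--             else:
--                 stack.remove(node)
--
--     return recursive
-- ===== Notes on version B (the rewrite author's own statement) =====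
-- stated objective: alternative
-- what changed: A's recursive nested dfs closure is replaced by an iterative DFS driving an explicit stack of (node, remaining-callees) frames inside the same outer loop, with identical visit order and back-edge detection.
import Mathlib
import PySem

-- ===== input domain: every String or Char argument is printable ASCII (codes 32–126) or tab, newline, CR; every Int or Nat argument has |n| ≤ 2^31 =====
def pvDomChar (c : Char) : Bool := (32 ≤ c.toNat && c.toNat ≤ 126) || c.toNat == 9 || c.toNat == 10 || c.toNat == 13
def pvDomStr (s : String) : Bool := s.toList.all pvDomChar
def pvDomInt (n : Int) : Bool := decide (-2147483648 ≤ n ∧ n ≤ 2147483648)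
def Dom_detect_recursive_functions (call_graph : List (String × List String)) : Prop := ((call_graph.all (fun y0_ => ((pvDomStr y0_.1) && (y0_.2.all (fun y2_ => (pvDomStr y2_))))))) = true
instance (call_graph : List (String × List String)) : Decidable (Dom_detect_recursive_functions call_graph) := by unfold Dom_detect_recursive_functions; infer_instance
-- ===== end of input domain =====

-- B replaces A's recursive nested dfs by an iterative DFS over an explicit stack of
-- (node, remaining-callees) frames, driven by the same outer loop (objective: alternative
-- decomposition, same visit order and cost).
-- Both ports carry a Nat fuel as a totality guard only (the recursion depth is bounded by
-- the number of nodes, so on every actual run the fuel never reaches 0).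

-- ===== PORT A =====

/-- shared DFS state: the three Python sets `visited`, `stack`, `recursive`. -/
structure PvSt where
  visited : PySem.Set String
  stack : PySem.Set String
  recursive : PySem.Set String
deriving Repr, DecidableEq

/-- `call_graph.get(func, [])` (dict lookup with default). -/
def pvLookup (cg : List (String × List String)) (f : String) : List String :=
  (PySem.Dict.mk cg).getD f []

/-- the nested `dfs` of A; `for callee in …: dfs(callee)` is the foldl. Fuel is a totality guard. -/
def pvDfsA (cg : List (String × List String)) : Nat → PvSt → String → PvSt
  | f, st, func =>
    if st.stack.contains func then { st with recursive := st.recursive.add func }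
    else if st.visited.contains func then st
    else
      match f with
      | 0 => st
      | g + 1 =>
        let st1 : PvSt := { st with visited := st.visited.add func, stack := st.stack.add func }
        let st2 := (pvLookup cg func).foldl (fun s c => pvDfsA cg g s c) st1
        { st2 with stack := st2.stack.discard func }

/-- fuel bound: more than the total number of node occurrences in the graph. -/
def pvFuel (cg : List (String × List String)) : Nat :=
  cg.foldl (fun a p => a + 1 + p.2.length) 0

def detect_recursive_functions (call_graph : List (String × List String)) : List String :=
  (call_graph.foldl (fun s p => pvDfsA call_graph (pvFuel call_graph + 1) s p.1)
    ⟨PySem.Set.empty, PySem.Set.empty, PySem.Set.empty⟩).recursive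

-- ===== PORT B =====

/-- bound on callee-list lengths, for the termination measure of the frame machine. -/
def pvW (cg : List (String × List String)) : Nat :=
  cg.foldl (fun m p => max m p.2.length) 0 + 2

theorem pv_le_foldl_max (l : List (String × List String)) (n : Nat) :
    n ≤ l.foldl (fun m q => max m q.2.length) n := by
  induction l generalizing n with
  | nil => simp
  | cons h t ih => exact le_trans (Nat.le_max_left _ _) (ih _)

theorem pv_mem_le_foldl_max (l : List (String × List String)) (n : Nat) (p : String × List String)
    (hp : p ∈ l) : p.2.length ≤ l.foldl (fun m q => max m q.2.length) n := by
  induction l generalizing n with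
  | nil => cases hp
  | cons h t ih =>
    rcases List.mem_cons.1 hp with rfl | hp'
    · exact le_trans (Nat.le_max_right _ _) (pv_le_foldl_max _ _)
    · exact ih _ hp'

theorem pvLookup_lt_pvW (cg : List (String × List String)) (c : String) :
    (pvLookup cg c).length + 1 < pvW cg := by
  unfold pvLookup pvW PySem.Dict.getD
  cases hf : (PySem.Dict.mk cg).get? c with
  | none => simp
  | some v =>
    have hv : (c, v) ∈ cg := PySem.Dict.mem_items_of_get?_eq_some (d := PySem.Dict.mk cg) hf
    have hle := pv_mem_le_foldl_max cg 0 (c, v) hv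
    simp only at hle
    simp only [Option.getD_some]
    omega

/-- B's frame machine: each frame is (fuel guard, node, remaining callees). -/
def pvRunB (cg : List (String × List String)) :
    List (Nat × String × List String) → PvSt → PvSt
  | [], st => st
  | (f, node, todo) :: rest, st =>
    match todo with
    | [] => pvRunB cg rest { st with stack := st.stack.discard node }
    | c :: cs =>
      if st.stack.contains c then
        pvRunB cg ((f, node, cs) :: rest) { st with recursive := st.recursive.add c }
      else if st.visited.contains c then
        pvRunB cg ((f, node, cs) :: rest) st
      else
        match f with
        | 0 => pvRunB cg ((0, node, cs) :: rest) st
        | g + 1 =>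
          pvRunB cg ((g, c, pvLookup cg c) :: (g + 1, node, cs) :: rest)
            { st with visited := st.visited.add c, stack := st.stack.add c }
  termination_by frames _ => (frames.map (fun t => (t.2.2.length + 1) * (pvW cg) ^ t.1)).sum
  decreasing_by
  · have h1 : 0 < pvW cg ^ f := Nat.pow_pos (by unfold pvW; omega)
    simp only [List.map_cons, List.sum_cons, List.length_nil]
    nlinarith
  · have h1 : 0 < pvW cg ^ f := Nat.pow_pos (by unfold pvW; omega)
    simp only [List.map_cons, List.sum_cons, List.length_cons]
    nlinarith
  · have h1 : 0 < pvW cg ^ f := Nat.pow_pos (by unfold pvW; omega)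
    simp only [List.map_cons, List.sum_cons, List.length_cons]
    nlinarith
  · simp only [List.map_cons, List.sum_cons, List.length_cons]
    nlinarith
  · have h1 : 0 < pvW cg ^ g := Nat.pow_pos (by unfold pvW; omega)
    have h2 : (pvLookup cg c).length + 1 < pvW cg := pvLookup_lt_pvW cg c
    have h3 := Nat.mul_lt_mul_of_lt_of_le h2 (Nat.le_refl (pvW cg ^ g)) h1
    simp only [List.map_cons, List.sum_cons, List.length_cons, pow_succ]
    nlinarith

def detect_recursive_functions_alt (call_graph : List (String × List String)) : List String :=
  (call_graph.foldl (fun (s : PvSt) (p : String × List String) =>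
      if s.visited.contains p.1 then s
      else
        pvRunB call_graph [(pvFuel call_graph, p.1, pvLookup call_graph p.1)]
          { s with visited := s.visited.add p.1, stack := s.stack.add p.1 })
    ⟨PySem.Set.empty, PySem.Set.empty, PySem.Set.empty⟩).recursive

-- ===== PRECONDITION & SPEC =====
def Spec_detect_recursive_functions (call_graph : List (String × List String)) (out : List String) : Prop := out = detect_recursive_functions_alt call_graph
instance (call_graph : List (String × List String)) (out : List String) : Decidable (Spec_detect_recursive_functions call_graph out) := by unfold Spec_detect_recursive_functions; infer_instance

-- ===== CLAIM (what is proved, stated in full; the proofs are below) =====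
def Claim_equal_detect_recursive_functions : Prop := ∀ (call_graph : List (String × List String)), Dom_detect_recursive_functions call_graph → Spec_detect_recursive_functions call_graph (detect_recursive_functions call_graph)

-- ===== LEMMAS AND PROOFS =====

theorem pv_discard_add (s : PySem.Set String) (x : String) (h : s.contains x = false) :
    PySem.Set.discard (PySem.Set.add s x) x = s := by
  have hx : x ∉ s := by
    intro hmem
    have hc : PySem.Set.contains s x = true := by
      unfold PySem.Set.contains
      exact List.elem_eq_true_of_mem hmem
    rw [h] at hc
    exact Bool.false_ne_true hc
  have hfs : List.filter (fun y => !y == x) s = s := by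
    apply List.filter_eq_self.2
    intro a ha
    simp only [Bool.not_eq_eq_eq_not, Bool.not_true, beq_eq_false_iff_ne]
    intro heq
    exact hx (heq ▸ ha)
  unfold PySem.Set.add PySem.Set.discard
  rw [h]
  simp only [Bool.false_eq_true, if_false, List.filter_append, hfs]
  simp

theorem pv_stack_dfsA (cg : List (String × List String)) :
    ∀ (f : Nat) (st : PvSt) (func : String), (pvDfsA cg f st func).stack = st.stack := by
  intro f
  induction f with
  | zero =>
    intro st func
    rw [pvDfsA]
    split
    · rfl
    · split <;> rfl
  | succ g ih =>
    intro st func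
    rw [pvDfsA]
    split
    · rfl
    · rename_i hstk
      split
      · rfl
      · rename_i hvis
        have hfold : ∀ (l : List String) (s : PvSt),
            (l.foldl (fun s c => pvDfsA cg g s c) s).stack = s.stack := by
          intro l
          induction l with
          | nil => intro s; rfl
          | cons c cs ihl => intro s; rw [List.foldl_cons, ihl, ih]
        simp only [hfold]
        exact pv_discard_add _ _ (by simpa using hstk)

/-- main simulation: a frame (g, node, cs) drains to folding dfs over cs then popping node. -/
theorem pv_run_eq (cg : List (String × List String)) :
    ∀ (g : Nat) (cs : List String) (node : String)
      (rest : List (Nat × String × List String)) (st : PvSt),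
      pvRunB cg ((g, node, cs) :: rest) st =
        pvRunB cg rest
          (let st2 := cs.foldl (fun s c => pvDfsA cg g s c) st
           { st2 with stack := st2.stack.discard node }) := by
  intro g
  induction g with
  | zero =>
    intro cs
    induction cs with
    | nil => intro node rest st; rw [pvRunB]; simp only [List.foldl_nil]
    | cons c cs ihcs =>
      intro node rest st
      rw [pvRunB]
      simp only [List.foldl_cons]
      rw [pvDfsA]
      split
      · rw [ihcs]
      · split
        · rw [ihcs]
        · rw [ihcs]
  | succ g ihg =>
    intro cs
    induction cs with
    | nil => intro node rest st; rw [pvRunB]; simp only [List.foldl_nil]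
    | cons c cs ihcs =>
      intro node rest st
      rw [pvRunB]
      simp only [List.foldl_cons]
      rw [pvDfsA]
      split
      · rw [ihcs]
      · split
        · rw [ihcs]
        · rw [ihg, ihcs]

/-- one top-level step of A equals one top-level step of B, when the stack is empty. -/
theorem pv_step_eq (cg : List (String × List String)) (F : Nat) (st : PvSt) (func : String)
    (hstk : st.stack = PySem.Set.empty) :
    pvDfsA cg (F + 1) st func =
      (if st.visited.contains func then st
       else pvRunB cg [(F, func, pvLookup cg func)]
         { st with visited := st.visited.add func, stack := st.stack.add func }) := by
  rw [pvDfsA]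
  have hc : st.stack.contains func = false := by
    rw [hstk]; rfl
  rw [hc]
  simp only [Bool.false_eq_true, if_false]
  split
  · rfl
  · rw [pv_run_eq]
    rw [pvRunB]

-- ===== VERDICT (by name: the statement is the Claim_ definition above) =====
theorem detect_recursive_functions_spec : Claim_equal_detect_recursive_functions := by
  intro cg _
  unfold Spec_detect_recursive_functions detect_recursive_functions detect_recursive_functions_alt
  suffices h : ∀ (l : List (String × List String)) (st : PvSt), st.stack = PySem.Set.empty →
      l.foldl (fun s p => pvDfsA cg (pvFuel cg + 1) s p.1) st =
        l.foldl (fun s p =>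
          if s.visited.contains p.1 then s
          else pvRunB cg [(pvFuel cg, p.1, pvLookup cg p.1)]
            { s with visited := s.visited.add p.1, stack := s.stack.add p.1 }) st by
    rw [h _ _ rfl]
  intro l
  induction l with
  | nil => intro st _; rfl
  | cons p t ih =>
    intro st hstk
    simp only [List.foldl_cons]
    rw [← pv_step_eq cg (pvFuel cg) st p.1 hstk]
    exact ih _ (by rw [pv_stack_dfsA cg _ st p.1, hstk])
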